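-- pv_equiv track=rewrite | github.com/mcatalano26/AdventOfCode2024 | Day4/p1.py | up_right_diagonal_matches
-- ===== SOURCE A (Python) =====
-- from typing import List
--
-- def up_right_diagonal_matches(matrix: List[List[str]]) -> int:
--     matches = 0
--     for row_id, row in enumerate(matrix):
--             for column_id, letter in enumerate(row):
--                   if letter == "X":
--                         if row_id-3>=0:
--                             try:
--                                 if matrix[row_id-1][column_id+1] == "M" and matrix[row_id-2][column_id+2] == "A" and matrix[row_id-3][column_id+3] == "S":
--                                         matches += 1
--                             except IndexError:
--                                 continue
--     return matches
-- ===== SOURCE B (Python) =====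
-- from typing import List
--
-- def up_right_diagonal_matches(matrix: List[List[str]]) -> int:
--     # Walk each up-right diagonal (constant row+column) from its highest row
--     # upward, streaming the last three cells; a missing cell (short row) is
--     # None and breaks any would-be match.
--     nrows = len(matrix)
--     maxlen = max(map(len, matrix), default=0)
--     total = 0
--     for d in range(nrows + maxlen - 1):
--         p3 = p2 = p1 = None
--         for r in range(min(d, nrows - 1), -1, -1):
--             row = matrix[r]
--             c = d - r
--             cur = row[c] if c < len(row) else None
--             if (p3, p2, p1, cur) == ("X", "M", "A", "S"):
--                 total += 1
--             p3, p2, p1 = p2, p1, cur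
--     return total
-- ===== Notes on version B (the rewrite author's own statement) =====
-- stated objective: alternative
-- what changed: Instead of scanning every cell and probing the three up-right neighbours with try/except per 'X', B traverses each up-right diagonal (constant row+column) once from its bottom cell upward, streaming the last three seen cells (missing cells of short rows become None breaks) and counting X,M,A,S runs.
import Mathlib
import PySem

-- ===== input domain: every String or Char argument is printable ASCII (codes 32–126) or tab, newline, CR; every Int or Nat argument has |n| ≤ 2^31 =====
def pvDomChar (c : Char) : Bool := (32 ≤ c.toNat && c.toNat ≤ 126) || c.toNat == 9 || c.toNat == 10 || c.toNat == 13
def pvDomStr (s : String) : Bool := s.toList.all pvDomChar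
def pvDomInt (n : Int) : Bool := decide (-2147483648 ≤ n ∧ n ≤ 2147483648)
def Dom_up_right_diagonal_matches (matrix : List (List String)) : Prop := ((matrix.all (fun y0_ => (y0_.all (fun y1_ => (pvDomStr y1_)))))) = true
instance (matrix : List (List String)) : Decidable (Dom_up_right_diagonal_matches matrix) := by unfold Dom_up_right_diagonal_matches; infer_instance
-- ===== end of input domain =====

-- B replaces A's per-'X' neighbour probing (with try/except) by one streaming pass along each
-- up-right diagonal, breaking on missing cells of short rows; an alternative with the same return value.


-- ===== PORT A =====
-- the try-block: each pyGet? none is exactly a Python IndexError (caught → no increment),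
-- and the chained `and` short-circuits in the same order.
def pvACheck (matrix : List (List String)) (r c : Int) : Option Bool :=
  (PySem.List.pyGet? matrix (r - 1)).bind fun row1 =>
  (PySem.List.pyGet? row1 (c + 1)).bind fun v1 =>
  if v1 = "M" then
    (PySem.List.pyGet? matrix (r - 2)).bind fun row2 =>
    (PySem.List.pyGet? row2 (c + 2)).bind fun v2 =>
    if v2 = "A" then
      (PySem.List.pyGet? matrix (r - 3)).bind fun row3 =>
      (PySem.List.pyGet? row3 (c + 3)).bind fun v3 =>
      some (v3 = "S")
    else some false
  else some false

def up_right_diagonal_matches (matrix : List (List String)) : Int :=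
  (PySem.List.enumerate matrix).foldl (fun (cnt : Int) (rp : Int × List String) =>
    (PySem.List.enumerate rp.2).foldl (fun (cnt : Int) (cp : Int × String) =>
      if cp.2 = "X" then
        if rp.1 - 3 ≥ 0 then
          match pvACheck matrix rp.1 cp.1 with
          | some true => cnt + 1
          | _ => cnt
        else cnt
      else cnt) cnt) 0

-- ===== PORT B =====
-- state = (p3, p2, p1, total): the last three cells on the diagonal (None = gap) and the count
def pvBStep (matrix : List (List String)) (d : Int)
    (st : Option String × Option String × Option String × Int) (r : Int) :
    Option String × Option String × Option String × Int :=
  let row := PySem.List.pyGetD matrix r []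
  let c := d - r
  let cur := if c < PySem.List.len row then PySem.List.pyGet? row c else none
  let total := if st.1 = some "X" ∧ st.2.1 = some "M" ∧ st.2.2.1 = some "A" ∧ cur = some "S"
               then st.2.2.2 + 1 else st.2.2.2
  (st.2.1, st.2.2.1, cur, total)

def up_right_diagonal_matches_alt (matrix : List (List String)) : Int :=
  let nrows := PySem.List.len matrix
  -- max(map(len, matrix), default=0): equal to this fold since every length is ≥ 0
  let maxlen := (matrix.map PySem.List.len).foldl max 0
  (PySem.List.pyRange 0 (nrows + maxlen - 1) 1).foldl (fun total d =>
    ((PySem.List.pyRange (min d (nrows - 1)) (-1) (-1)).foldl (pvBStep matrix d)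
      (none, none, none, total)).2.2.2) 0

-- ===== PRECONDITION & SPEC =====
def Spec_up_right_diagonal_matches (matrix : List (List String)) (out : Int) : Prop := out = up_right_diagonal_matches_alt matrix
instance (matrix : List (List String)) (out : Int) : Decidable (Spec_up_right_diagonal_matches matrix out) := by unfold Spec_up_right_diagonal_matches; infer_instance

-- ===== CLAIM (what is proved, stated in full; the proofs are below) =====
def Claim_equal_up_right_diagonal_matches : Prop := ∀ (matrix : List (List String)), Dom_up_right_diagonal_matches matrix → Spec_up_right_diagonal_matches matrix (up_right_diagonal_matches matrix)

-- ===== LEMMAS AND PROOFS =====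

-- the common reference value: cell lookup, hit test, and the double sum over all cells
def pvCellB (matrix : List (List String)) (r c : Nat) : Option String :=
  matrix[r]?.bind (fun row => row[c]?)

def pvHit (matrix : List (List String)) (r c : Nat) : Bool :=
  decide (3 ≤ r) && (pvCellB matrix r c == some "X") && (pvCellB matrix (r-1) (c+1) == some "M")
    && (pvCellB matrix (r-2) (c+2) == some "A") && (pvCellB matrix (r-3) (c+3) == some "S")

def pvInd (matrix : List (List String)) (r c : Nat) : Int := if pvHit matrix r c then 1 else 0

def pvS (matrix : List (List String)) : Int :=
  ∑ r ∈ Finset.range matrix.length, ∑ c ∈ Finset.range (matrix.getD r []).length, pvInd matrix r c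


-- ---------- generic bridge lemmas ----------
lemma pv_sum_range (n : Nat) (f : Nat → Int) :
    ((List.range n).map f).sum = ∑ i ∈ Finset.range n, f i := by
  induction n with
  | zero => simp
  | succ n ih => rw [List.range_succ, Finset.sum_range_succ]; simp [ih]

-- an additive loop body turns the fold into a sum (foldl_congr_mem + foldl_add, refine-friendly)
lemma pvFoldSum {β : Type} (l : List β) (f : Int → β → Int) (F : β → Int) (a : Int)
    (h : ∀ (acc : Int), ∀ k ∈ l, f acc k = acc + F k) :
    l.foldl f a = a + (l.map F).sum := by
  rw [PySem.List.foldl_congr_mem l f (fun acc k => acc + F k) a h, PySem.List.foldl_add]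

-- ---------- A side ----------
def pvTermA (matrix : List (List String)) (r c : Int) (letter : String) : Int :=
  if letter = "X" then
    if r - 3 ≥ 0 then
      (match pvACheck matrix r c with | some true => (1:Int) | _ => 0)
    else 0
  else 0

lemma pvA_sum (matrix : List (List String)) :
    up_right_diagonal_matches matrix
      = ((PySem.List.enumerate matrix).map (fun rp =>
          ((PySem.List.enumerate rp.2).map (fun cp => pvTermA matrix rp.1 cp.1 cp.2)).sum)).sum := by
  unfold up_right_diagonal_matches
  refine Eq.trans (pvFoldSum _ _
    (fun rp => ((PySem.List.enumerate rp.2).map (fun cp => pvTermA matrix rp.1 cp.1 cp.2)).sum)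
    0 ?_) (by simp)
  intro acc rp _
  refine pvFoldSum _ _ (fun (cp : Int × String) => pvTermA matrix rp.1 cp.1 cp.2) acc ?_
  intro acc2 x _
  by_cases h1 : x.2 = "X"
  · by_cases h2 : rp.1 - 3 ≥ 0
    · have h2' : (3:Int) ≤ rp.1 := by omega
      rcases h : pvACheck matrix rp.1 x.1 with _ | b
      · simp [pvTermA, h1, h2', h]
      · cases b <;> simp [pvTermA, h1, h2', h]
    · have h2' : ¬ ((3:Int) ≤ rp.1) := by omega
      simp [pvTermA, h1, h2']
  · simp [pvTermA, h1]

lemma pv_enum_sum {α : Type} (xs : List α) (d : α) (g : Int × α → Int) :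
    ((PySem.List.enumerate xs).map g).sum
      = ((List.range xs.length).map (fun (k : Nat) => g ((k : Int), xs.getD k d))).sum := by
  rw [PySem.List.enumerate_eq_map_pyRange xs d, PySem.List.pyRange_one]
  simp [List.map_map, Function.comp_def, PySem.List.len_eq, List.getD_eq_getElem?_getD]

lemma pvACheck_eq (matrix : List (List String)) (r c : Nat) (h3 : 3 ≤ r) :
    pvACheck matrix (↑r) (↑c)
      = (pvCellB matrix (r-1) (c+1)).bind (fun v1 =>
          if v1 = "M" then
            (pvCellB matrix (r-2) (c+2)).bind (fun v2 =>
              if v2 = "A" then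
                (pvCellB matrix (r-3) (c+3)).bind (fun v3 => some (decide (v3 = "S")))
              else some false)
          else some false) := by
  unfold pvACheck pvCellB
  have e1 : (↑r : Int) - 1 = ↑(r-1) := by omega
  have e2 : (↑r : Int) - 2 = ↑(r-2) := by omega
  have e3 : (↑r : Int) - 3 = ↑(r-3) := by omega
  have f1 : (↑c : Int) + 1 = ↑(c+1) := by omega
  have f2 : (↑c : Int) + 2 = ↑(c+2) := by omega
  have f3 : (↑c : Int) + 3 = ↑(c+3) := by omega
  rw [e1, e2, e3, f1, f2, f3]
  simp only [PySem.List.pyGet?_natCast]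
  cases matrix[r-1]? <;> cases matrix[r-2]? <;> cases matrix[r-3]? <;>
    simp

lemma pvTermA_pt (matrix : List (List String)) (r c : Nat)
    (hr : r < matrix.length) (hc : c < (matrix.getD r []).length) :
    pvTermA matrix (↑r) (↑c) ((matrix.getD r []).getD c "") = pvInd matrix r c := by
  have hrow : matrix.getD r [] = matrix[r] := List.getD_eq_getElem _ _ hr
  rw [hrow] at hc
  rw [hrow, List.getD_eq_getElem _ _ hc]
  have hcell : pvCellB matrix r c = some (matrix[r][c]) := by
    unfold pvCellB
    rw [List.getElem?_eq_getElem hr]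
    simp [List.getElem?_eq_getElem hc]
  unfold pvTermA pvInd pvHit
  by_cases hX : matrix[r][c] = "X"
  · by_cases h3 : 3 ≤ r
    · have hge : ((↑r : Int) - 3 ≥ 0) := by omega
      rw [pvACheck_eq matrix r c h3]
      rcases hv1 : pvCellB matrix (r-1) (c+1) with _ | v1
      · simp [hX, hcell, h3]
      · by_cases hM : v1 = "M"
        · rcases hv2 : pvCellB matrix (r-2) (c+2) with _ | v2
          · simp [hX, hcell, hM, h3]
          · by_cases hA : v2 = "A"
            · rcases hv3 : pvCellB matrix (r-3) (c+3) with _ | v3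
              · simp [hX, hcell, hM, hA, h3]
              · by_cases hS : v3 = "S" <;>
                  simp [hX, hcell, hM, hA, hS, h3]
            · simp [hX, hcell, hM, hA, h3]
        · simp [hX, hcell, hM, h3]
    · have hge : ¬ ((↑r : Int) - 3 ≥ 0) := by omega
      simp [h3]
  · simp [hX, hcell]

lemma pvA_eq_S (matrix : List (List String)) : up_right_diagonal_matches matrix = pvS matrix := by
  rw [pvA_sum, pv_enum_sum matrix ([] : List String)]
  unfold pvS
  rw [pv_sum_range]
  apply Finset.sum_congr rfl
  intro r hr
  rw [Finset.mem_range] at hr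
  rw [pv_enum_sum _ ""]
  rw [pv_sum_range]
  apply Finset.sum_congr rfl
  intro c hc
  rw [Finset.mem_range] at hc
  exact pvTermA_pt matrix r c hr hc

-- ---------- B side ----------
def pvGStep (st : Option String × Option String × Option String × Int) (cur : Option String) :
    Option String × Option String × Option String × Int :=
  (st.2.1, st.2.2.1, cur,
    if st.1 = some "X" ∧ st.2.1 = some "M" ∧ st.2.2.1 = some "A" ∧ cur = some "S"
    then st.2.2.2 + 1 else st.2.2.2)

def pvToCell (matrix : List (List String)) (d r : Int) : Option String :=
  let row := PySem.List.pyGetD matrix r []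
  if d - r < PySem.List.len row then PySem.List.pyGet? row (d - r) else none

lemma pvBStep_eq (matrix : List (List String)) (d : Int) (st) (r : Int) :
    pvBStep matrix d st r = pvGStep st (pvToCell matrix d r) := rfl

def pvWin : List (Option String) → Int
  | a :: b :: c :: e :: rest =>
      (if a = some "X" ∧ b = some "M" ∧ c = some "A" ∧ e = some "S" then 1 else 0)
        + pvWin (b :: c :: e :: rest)
  | _ => 0
termination_by l => l.length

lemma pvWin_cons4 (a b c e : Option String) (rest : List (Option String)) :
    pvWin (a :: b :: c :: e :: rest)
      = (if a = some "X" ∧ b = some "M" ∧ c = some "A" ∧ e = some "S" then 1 else 0)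
        + pvWin (b :: c :: e :: rest) := by
  rw [pvWin]

lemma pvWin_le3 (l : List (Option String)) (h : l.length ≤ 3) : pvWin l = 0 := by
  rcases l with _ | ⟨a, _ | ⟨b, _ | ⟨c, _ | ⟨e, t⟩⟩⟩⟩
  · simp [pvWin]
  · simp [pvWin]
  · simp [pvWin]
  · simp [pvWin]
  · exact absurd h (by simp)

lemma pvWin_none_cons (l : List (Option String)) : pvWin (none :: l) = pvWin l := by
  rcases l with _ | ⟨b, _ | ⟨c, _ | ⟨e, t⟩⟩⟩
  · simp [pvWin]
  · simp [pvWin]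
  · simp [pvWin]
  · rw [pvWin_cons4]; simp

lemma pvStream (cells : List (Option String)) :
    ∀ (p3 p2 p1 : Option String) (t : Int),
    (cells.foldl pvGStep (p3, p2, p1, t)).2.2.2 = t + pvWin (p3 :: p2 :: p1 :: cells) := by
  induction cells with
  | nil => intro p3 p2 p1 t; rw [pvWin_le3 _ (by simp)]; simp
  | cons cur rest ih =>
      intro p3 p2 p1 t
      rw [List.foldl_cons]
      rw [show pvGStep (p3,p2,p1,t) cur
            = (p2, p1, cur, if p3 = some "X" ∧ p2 = some "M" ∧ p1 = some "A" ∧ cur = some "S"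
                            then t + 1 else t) from rfl]
      rw [ih p2 p1 cur _]
      rw [pvWin_cons4]
      split_ifs <;> ring

def pvDesc (matrix : List (List String)) (dn : Nat) : Nat → List (Option String)
  | 0 => [pvCellB matrix 0 dn]
  | (m+1) => pvCellB matrix (m+1) (dn - (m+1)) :: pvDesc matrix dn m

lemma pvDesc_map (matrix : List (List String)) (dn : Nat) (m : Nat) :
    (List.range (m+1)).map (fun k => pvCellB matrix (m - k) (dn - (m - k)))
      = pvDesc matrix dn m := by
  induction m with
  | zero => simp [pvDesc]
  | succ m ih =>
      rw [List.range_succ_eq_map, List.map_cons, List.map_map]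
      have : ((fun k => pvCellB matrix (m + 1 - k) (dn - (m + 1 - k))) ∘ Nat.succ)
           = (fun k => pvCellB matrix (m - k) (dn - (m - k))) := by
        funext k
        simp [Function.comp, Nat.succ_sub_succ]
      rw [this, ih]
      simp [pvDesc]

lemma pvInd_lt3 (matrix : List (List String)) (r c : Nat) (h : r < 3) : pvInd matrix r c = 0 := by
  have : ¬ (3 ≤ r) := by omega
  simp [pvInd, pvHit, this]

lemma pvDesc_head (matrix : List (List String)) (dn k : Nat) :
    ∃ tl, pvDesc matrix dn k = pvCellB matrix k (dn - k) :: tl := by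
  cases k with
  | zero => exact ⟨[], rfl⟩
  | succ j => exact ⟨pvDesc matrix dn j, rfl⟩

lemma pvWin_desc (matrix : List (List String)) (dn : Nat) :
    ∀ m, m < matrix.length → m ≤ dn →
    pvWin (pvDesc matrix dn m) = ∑ r ∈ Finset.range (m+1), pvInd matrix r (dn - r) := by
  intro m
  induction m using Nat.strong_induction_on with
  | _ m ih =>
    intro hmn hmd
    match m with
    | 0 =>
        rw [pvWin_le3 _ (by simp [pvDesc])]
        rw [Finset.sum_eq_zero]
        intro r hr; rw [Finset.mem_range] at hr
        exact pvInd_lt3 matrix r _ (by omega)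
    | 1 =>
        rw [pvWin_le3 _ (by simp [pvDesc])]
        rw [Finset.sum_eq_zero]
        intro r hr; rw [Finset.mem_range] at hr
        exact pvInd_lt3 matrix r _ (by omega)
    | 2 =>
        rw [pvWin_le3 _ (by simp [pvDesc])]
        rw [Finset.sum_eq_zero]
        intro r hr; rw [Finset.mem_range] at hr
        exact pvInd_lt3 matrix r _ (by omega)
    | (k+3) =>
        obtain ⟨tl, htl⟩ := pvDesc_head matrix dn k
        have hexp : pvDesc matrix dn (k+3)
            = pvCellB matrix (k+3) (dn - (k+3)) :: pvCellB matrix (k+2) (dn - (k+2))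
              :: pvCellB matrix (k+1) (dn - (k+1)) :: pvCellB matrix k (dn - k) :: tl := by
          show pvCellB matrix (k+3) (dn - (k+3)) :: pvCellB matrix (k+2) (dn - (k+2))
              :: pvCellB matrix (k+1) (dn - (k+1)) :: pvDesc matrix dn k = _
          rw [htl]
        rw [hexp, pvWin_cons4]
        have hback : pvCellB matrix (k+2) (dn - (k+2)) :: pvCellB matrix (k+1) (dn - (k+1))
              :: pvCellB matrix k (dn - k) :: tl = pvDesc matrix dn (k+2) := by
          show _ = pvCellB matrix (k+2) (dn - (k+2)) :: pvCellB matrix (k+1) (dn - (k+1))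
              :: pvDesc matrix dn k
          rw [htl]
        rw [hback, ih (k+2) (by omega) (by omega) (by omega)]
        conv_rhs => rw [Finset.sum_range_succ]
        have hc1 : dn - (k+3) + 1 = dn - (k+2) := by omega
        have hc2 : dn - (k+3) + 2 = dn - (k+1) := by omega
        have hc3 : dn - (k+3) + 3 = dn - k := by omega
        have hind : pvInd matrix (k+3) (dn - (k+3))
            = (if pvCellB matrix (k+3) (dn - (k+3)) = some "X"
                ∧ pvCellB matrix (k+2) (dn - (k+2)) = some "M"
                ∧ pvCellB matrix (k+1) (dn - (k+1)) = some "A"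
                ∧ pvCellB matrix k (dn - k) = some "S" then 1 else 0) := by
          unfold pvInd pvHit
          rw [show (k+3) - 1 = k+2 from by omega, show (k+3) - 2 = k+1 from by omega,
              show (k+3) - 3 = k from by omega, hc1, hc2, hc3]
          have h33 : (3 ≤ k + 3) := by omega
          simp only [h33, decide_true, Bool.true_and]
          split_ifs with h1 h2 <;> first | rfl | (exfalso; simp_all)
        rw [hind]
        ring

lemma pvToCell_eq (matrix : List (List String)) (dn rn : Nat)
    (hrn : rn < matrix.length) (hrd : rn ≤ dn) :
    pvToCell matrix (↑dn) (↑rn) = pvCellB matrix rn (dn - rn) := by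
  unfold pvToCell pvCellB
  have h1 : (↑dn : Int) - ↑rn = ↑(dn - rn) := by omega
  rw [h1]
  simp only [PySem.List.pyGetD_natCast, PySem.List.len_eq]
  rw [List.getElem?_eq_getElem hrn, List.getD_eq_getElem _ _ hrn]
  by_cases hlt : dn - rn < matrix[rn].length
  · simp [hlt]
  · have hnone : matrix[rn][dn - rn]? = none := by
      rw [List.getElem?_eq_none]; omega
    simp [hlt]

lemma pvDiag (matrix : List (List String)) (dn : Nat) (t : Int)
    (hn : 1 ≤ matrix.length) :
    ((PySem.List.pyRange (min (↑dn) ((matrix.length : Int) - 1)) (-1) (-1)).foldl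
        (pvBStep matrix (↑dn)) (none, none, none, t)).2.2.2
      = t + ∑ r ∈ Finset.range (min dn (matrix.length - 1) + 1), pvInd matrix r (dn - r) := by
  set n := matrix.length with hnn
  set m := min dn (n - 1) with hm
  have hmi : (min (↑dn) ((n : Int) - 1)) = (↑m : Int) := by omega
  rw [hmi, PySem.List.pyRange_neg_one]
  have hlen : ((↑m : Int) - (-1)).toNat = m + 1 := by omega
  rw [hlen]
  have hcells : ((List.range (m+1)).map (fun k => (↑m : Int) - ↑k)).foldl
        (pvBStep matrix (↑dn)) (none, none, none, t)
      = ((List.range (m+1)).map (fun k => pvCellB matrix (m - k) (dn - (m - k)))).foldl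
          pvGStep (none, none, none, t) := by
    rw [List.foldl_map, List.foldl_map]
    apply PySem.List.foldl_congr_mem
    intro acc k hk
    rw [List.mem_range] at hk
    rw [pvBStep_eq]
    congr 1
    have hek : (↑m : Int) - ↑k = ↑(m - k) := by omega
    rw [hek]
    exact pvToCell_eq matrix dn (m - k) (by omega) (by omega)
  rw [hcells, pvStream, pvWin_none_cons, pvWin_none_cons, pvWin_none_cons,
      pvDesc_map, pvWin_desc matrix dn m (by omega) (by omega)]

lemma pvInd_oob (matrix : List (List String)) (r c : Nat)
    (h : (matrix.getD r []).length ≤ c) : pvInd matrix r c = 0 := by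
  have hnone : pvCellB matrix r c = none := by
    unfold pvCellB
    cases hr : matrix[r]? with
    | none => rfl
    | some row =>
        have hrow : matrix.getD r [] = row := by
          rw [List.getD_eq_getElem?_getD, hr]; rfl
        rw [hrow] at h
        simp only [Option.bind_some]
        rw [List.getElem?_eq_none h]
  simp [pvInd, pvHit, hnone]

lemma pvSwap (matrix : List (List String)) (MN : Nat)
    (hn : 1 ≤ matrix.length)
    (hrow : ∀ r < matrix.length, (matrix.getD r []).length ≤ MN) :
    ∑ dn ∈ Finset.range (matrix.length + MN - 1),
      ∑ r ∈ Finset.range (min dn (matrix.length - 1) + 1), pvInd matrix r (dn - r)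
    = pvS matrix := by
  set n := matrix.length with hnn
  set Dn := n + MN - 1 with hDn
  have step1 : ∀ dn, ∑ r ∈ Finset.range (min dn (n - 1) + 1), pvInd matrix r (dn - r)
      = ∑ r ∈ Finset.range n, if r ≤ dn then pvInd matrix r (dn - r) else 0 := by
    intro dn
    rw [← Finset.sum_filter]
    apply Finset.sum_congr _ (fun _ _ => rfl)
    ext r
    simp only [Finset.mem_filter, Finset.mem_range]
    omega
  calc ∑ dn ∈ Finset.range Dn, ∑ r ∈ Finset.range (min dn (n - 1) + 1), pvInd matrix r (dn - r)
      = ∑ dn ∈ Finset.range Dn, ∑ r ∈ Finset.range n,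
          if r ≤ dn then pvInd matrix r (dn - r) else 0 :=
        Finset.sum_congr rfl (fun dn _ => step1 dn)
    _ = ∑ r ∈ Finset.range n, ∑ dn ∈ Finset.range Dn,
          if r ≤ dn then pvInd matrix r (dn - r) else 0 := Finset.sum_comm
    _ = ∑ r ∈ Finset.range n, ∑ c ∈ Finset.range ((matrix.getD r []).length),
          pvInd matrix r c := by
        apply Finset.sum_congr rfl
        intro r hr
        rw [Finset.mem_range] at hr
        rw [← Finset.sum_filter]
        have hfil : (Finset.range Dn).filter (fun dn => r ≤ dn) = Finset.Ico r Dn := by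
          ext dn
          simp only [Finset.mem_filter, Finset.mem_range, Finset.mem_Ico]
          omega
        rw [hfil, Finset.sum_Ico_eq_sum_range]
        have hpt : ∀ c, pvInd matrix r (r + c - r) = pvInd matrix r c := by
          intro c; congr 1; omega
        rw [Finset.sum_congr rfl (fun c _ => hpt c)]
        symm
        have hrl : (matrix.getD r []).length ≤ MN := hrow r hr
        apply Finset.sum_subset
        · intro x hx
          simp only [Finset.mem_range] at hx ⊢
          omega
        · intro c _ hc
          simp only [Finset.mem_range, not_lt] at hc
          exact pvInd_oob matrix r c hc

lemma pvB_eq_S (matrix : List (List String)) : up_right_diagonal_matches_alt matrix = pvS matrix := by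
  rcases Nat.eq_zero_or_pos matrix.length with hz | hn
  · have hnil : matrix = [] := List.length_eq_zero_iff.mp hz
    subst hnil
    simp [up_right_diagonal_matches_alt, pvS, PySem.List.len_eq,
      PySem.List.pyRange_one_eq_nil (by norm_num : (-1 : Int) ≤ 0)]
  · unfold up_right_diagonal_matches_alt
    simp only [PySem.List.len_eq]
    set n := matrix.length with hnn
    set MI := (matrix.map PySem.List.len).foldl max 0 with hMI
    have hMI0 : 0 ≤ MI := (PySem.List.le_foldl_max (matrix.map PySem.List.len) 0).1
    have hMIle : ∀ row ∈ matrix, PySem.List.len row ≤ MI := by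
      intro row hrowmem
      exact (PySem.List.le_foldl_max (matrix.map PySem.List.len) 0).2 _
        (List.mem_map_of_mem hrowmem)
    set MN := MI.toNat with hMN
    have hD : (↑n : Int) + MI - 1 = ↑(n + MN - 1) := by omega
    rw [hD, PySem.List.pyRange_one]
    have hDn : ((↑(n + MN - 1) : Int) - 0).toNat = n + MN - 1 := by omega
    rw [hDn]
    refine Eq.trans (pvFoldSum _ _
      (fun (d : Int) => ∑ r ∈ Finset.range (min d.toNat (n - 1) + 1), pvInd matrix r (d.toNat - r))
      0 ?_) ?_
    · intro acc d hd
      rw [List.mem_map] at hd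
      obtain ⟨k, _, hk⟩ := hd
      subst hk
      have hz : ((0:Int) + ↑k) = ↑k := by omega
      rw [hz]
      simpa using pvDiag matrix k acc hn
    · rw [List.map_map]
      have hcomp : ((fun (d : Int) => ∑ r ∈ Finset.range (min d.toNat (n - 1) + 1),
            pvInd matrix r (d.toNat - r)) ∘ (fun (k : Nat) => (0:Int) + ↑k))
          = (fun (k : Nat) => ∑ r ∈ Finset.range (min k (n - 1) + 1), pvInd matrix r (k - r)) := by
        funext k
        simp
      rw [hcomp, pv_sum_range, zero_add]
      apply pvSwap matrix MN hn
      intro r hr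
      have hmem : matrix.getD r [] ∈ matrix := by
        rw [List.getD_eq_getElem _ _ hr]
        exact List.getElem_mem hr
      have hlen := hMIle _ hmem
      rw [PySem.List.len_eq] at hlen
      omega

-- ===== VERDICT (by name: the statement is the Claim_ definition above) =====
theorem up_right_diagonal_matches_spec : Claim_equal_up_right_diagonal_matches := by
  intro matrix _
  unfold Spec_up_right_diagonal_matches
  rw [pvA_eq_S, pvB_eq_S]
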